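-- pv_equiv track=rewrite | github.com/nuge440/foundry-management-system | sync/jb_sync.py | derive_flags_from_operations
-- ===== SOURCE A (Python) =====
-- def derive_flags_from_operations(operations):
--     """Derive is_expedite and requires_material_certs from operations array"""
--     flags = {
--         'is_expedite': False,
--         'requires_material_certs': False
--     }
--     if not operations:
--         return flags
--
--     for op in operations:
--         wc = op.get('Work_Center', '')
--         if wc == 'EXPEDITE':
--             flags['is_expedite'] = True
--         elif wc == 'CERT':
--             flags['requires_material_certs'] = True
--
--     return flags
-- ===== SOURCE B (Python) =====
-- def derive_flags_from_operations(operations):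
--     """Derive is_expedite and requires_material_certs from operations array"""
--     return {
--         'is_expedite': any(op.get('Work_Center', '') == 'EXPEDITE' for op in operations),
--         'requires_material_certs': any(op.get('Work_Center', '') == 'CERT' for op in operations),
--     }
-- ===== Notes on version B (the rewrite author's own statement) =====
-- stated objective: idiomatic
-- what changed: Replaces the single scan maintaining a mutable flags dict (plus a redundant empty-list early return) by two independent short-circuiting any() scans, one per flag, each stopping at the first matching work center.
import Mathlib
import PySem

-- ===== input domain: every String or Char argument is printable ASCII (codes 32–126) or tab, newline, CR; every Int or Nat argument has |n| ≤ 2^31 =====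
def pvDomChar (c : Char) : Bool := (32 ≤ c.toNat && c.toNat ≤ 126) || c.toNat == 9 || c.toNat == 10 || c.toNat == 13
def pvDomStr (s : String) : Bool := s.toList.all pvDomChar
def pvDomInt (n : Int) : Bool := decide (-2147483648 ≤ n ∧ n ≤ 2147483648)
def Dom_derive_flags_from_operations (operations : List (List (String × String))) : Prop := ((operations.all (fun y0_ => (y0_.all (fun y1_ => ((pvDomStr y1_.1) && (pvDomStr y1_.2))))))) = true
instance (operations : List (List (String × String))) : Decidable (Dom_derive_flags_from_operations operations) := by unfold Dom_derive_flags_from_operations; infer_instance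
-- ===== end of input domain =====

-- B replaces A's single scan with a mutable flags dict (and the redundant empty-list early
-- return) by two independent short-circuiting any() passes, one per flag (idiomatic).

-- ===== PORT A =====
-- loop body of A: wc = op.get('Work_Center',''); if/elif updates the flags dict
def pvStepA (fl : PySem.Dict String Bool) (op : List (String × String)) : PySem.Dict String Bool :=
  let wc := (PySem.Dict.mk op).getD "Work_Center" ""
  if wc = "EXPEDITE" then fl.insert "is_expedite" true
  else if wc = "CERT" then fl.insert "requires_material_certs" true
  else fl

def derive_flags_from_operations (operations : List (List (String × String))) : List (String × Bool) :=
  let flags : PySem.Dict String Bool :=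
    PySem.Dict.ofList [("is_expedite", false), ("requires_material_certs", false)]
  if operations = [] then flags.items
  else (operations.foldl pvStepA flags).items

-- ===== PORT B =====
-- two separate any() scans, each short-circuiting at the first match (List.any short-circuits too)
def derive_flags_from_operations_alt (operations : List (List (String × String))) : List (String × Bool) :=
  [("is_expedite", operations.any (fun op => (PySem.Dict.mk op).getD "Work_Center" "" == "EXPEDITE")),
   ("requires_material_certs", operations.any (fun op => (PySem.Dict.mk op).getD "Work_Center" "" == "CERT"))]

-- ===== PRECONDITION & SPEC =====
def Spec_derive_flags_from_operations (operations : List (List (String × String))) (out : List (String × Bool)) : Prop := out = derive_flags_from_operations_alt operations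
instance (operations : List (List (String × String))) (out : List (String × Bool)) : Decidable (Spec_derive_flags_from_operations operations out) := by unfold Spec_derive_flags_from_operations; infer_instance

-- ===== CLAIM (what is proved, stated in full; the proofs are below) =====
def Claim_equal_derive_flags_from_operations : Prop := ∀ (operations : List (List (String × String))), Dom_derive_flags_from_operations operations → Spec_derive_flags_from_operations operations (derive_flags_from_operations operations)

-- ===== LEMMAS AND PROOFS =====
-- invariant of A's loop: the dict keeps its two keys in place; each flag becomes an 'any' over the list
theorem pvLoopA (ops : List (List (String × String))) (e c : Bool) :
    (ops.foldl pvStepA (PySem.Dict.mk [("is_expedite", e), ("requires_material_certs", c)])).items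
    = [("is_expedite", e || ops.any (fun op => (PySem.Dict.mk op).getD "Work_Center" "" == "EXPEDITE")),
       ("requires_material_certs", c || ops.any (fun op => (PySem.Dict.mk op).getD "Work_Center" "" == "CERT"))] := by
  induction ops generalizing e c with
  | nil => simp
  | cons op rest ih =>
    simp only [List.foldl_cons, List.any_cons]
    by_cases h1 : (PySem.Dict.mk op).getD "Work_Center" "" = "EXPEDITE"
    · simp [pvStepA, h1, PySem.Dict.insert, ih]
    · by_cases h2 : (PySem.Dict.mk op).getD "Work_Center" "" = "CERT"
      · simp [pvStepA, h2, PySem.Dict.insert, ih]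
      · have he : ((PySem.Dict.mk op).getD "Work_Center" "" == "EXPEDITE") = false :=
          beq_eq_false_iff_ne.mpr h1
        have hc : ((PySem.Dict.mk op).getD "Work_Center" "" == "CERT") = false :=
          beq_eq_false_iff_ne.mpr h2
        simp [pvStepA, h1, h2, ih, he, hc]

-- ===== VERDICT (by name: the statement is the Claim_ definition above) =====
theorem derive_flags_from_operations_spec : Claim_equal_derive_flags_from_operations := by
  intro operations _
  unfold Spec_derive_flags_from_operations derive_flags_from_operations derive_flags_from_operations_alt
  by_cases h : operations = []
  · subst h; rfl
  · simp only [h, if_false]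
    rw [show (PySem.Dict.ofList [("is_expedite", false), ("requires_material_certs", false)] : PySem.Dict String Bool)
        = PySem.Dict.mk [("is_expedite", false), ("requires_material_certs", false)] from rfl]
    rw [pvLoopA]
    rfl
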